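-- pv_equiv track=rewrite | github.com/mj-deving/omniweb-agents | docs/research/live-session-testing/2026-04-23-score100-audit/analyze.py | safe_length_stats
-- ===== SOURCE A (Python) =====
-- def safe_length_stats(texts):
--     lens = sorted(len(t) for t in texts)
--     if not lens: return {"min":0,"p25":0,"median":0,"p75":0,"max":0}
--     def q(p):
--         if len(lens)==1: return lens[0]
--         idx = int(p*(len(lens)-1))
--         return lens[idx]
--     return {"min":lens[0],"p25":q(0.25),"median":q(0.5),"p75":q(0.75),"max":lens[-1]}
-- ===== SOURCE B (Python) =====
-- def safe_length_stats(texts):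
--     lens = [len(t) for t in texts]
--     if not lens:
--         return {"min": 0, "p25": 0, "median": 0, "p75": 0, "max": 0}
--
--     def sel(xs, k):
--         # iterative quickselect (middle-element pivot): k-th smallest of xs
--         while True:
--             p = xs[len(xs) // 2]
--             lt = [x for x in xs if x < p]
--             if k < len(lt):
--                 xs = lt
--                 continue
--             gt = [x for x in xs if x > p]
--             neq = len(xs) - len(gt)
--             if k < neq:
--                 return p
--             xs, k = gt, k - neq
--
--     m = len(lens) - 1
--     return {"min": sel(lens, 0), "p25": sel(lens, m // 4),
--             "median": sel(lens, m // 2), "p75": sel(lens, 3 * m // 4),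
--             "max": sel(lens, m)}
-- ===== Notes on version B (the rewrite author's own statement) =====
-- stated objective: alternative
-- what changed: Replaces 'sort all lengths then index' with five iterative quickselects (middle-element pivot) at the fixed order-statistic positions 0, (n-1)//4, (n-1)//2, 3*(n-1)//4, n-1, turning the float index int(p*(n-1)) into exact integer arithmetic.
import Mathlib
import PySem

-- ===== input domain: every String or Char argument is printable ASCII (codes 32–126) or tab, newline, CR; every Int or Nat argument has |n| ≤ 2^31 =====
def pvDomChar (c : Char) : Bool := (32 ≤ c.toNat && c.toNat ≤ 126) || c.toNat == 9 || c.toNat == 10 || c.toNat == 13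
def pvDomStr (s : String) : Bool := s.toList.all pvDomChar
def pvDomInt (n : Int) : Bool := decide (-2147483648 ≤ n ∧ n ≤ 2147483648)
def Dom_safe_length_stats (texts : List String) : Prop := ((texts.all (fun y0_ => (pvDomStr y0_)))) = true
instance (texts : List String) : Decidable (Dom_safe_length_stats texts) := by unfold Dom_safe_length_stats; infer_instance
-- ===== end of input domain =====

-- B replaces the single full sort with five quickselects at the fixed order-statistic positions (alternative algorithm; no speed claim).

-- ===== PORT A =====
-- Port note: A's index int(p*(len-1)) for p ∈ {0.25, 0.5, 0.75} is ported as (num*(len-1)) // 4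
-- with num ∈ {1,2,3}: this is exact, since p*(len-1) is an exactly representable binary float
-- (3*(len-1) < 2^53 for any list) and int() truncates the nonnegative product, so the float
-- expression equals that integer floor division. lens[0]/lens[idx]/lens[-1] are ported with
-- PySem.List.pyGetD (default 0, never used: on the nonempty branch where Python evaluates them
-- the indices are always in range, so pyGet? is some).
def safe_length_stats (texts : List String) : List (String × Int) :=
  let lens : List Int := PySem.List.sorted (texts.map (fun t => PySem.Str.len t)) (fun x => x) false
  if lens.isEmpty then [("min", 0), ("p25", 0), ("median", 0), ("p75", 0), ("max", 0)]
  else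
    let q : Int → Int := fun num =>
      if lens.length = 1 then PySem.List.pyGetD lens 0 0
      else PySem.List.pyGetD lens (PySem.Int.floordiv (num * ((lens.length : Int) - 1)) 4) 0
    [("min", PySem.List.pyGetD lens 0 0), ("p25", q 1), ("median", q 2), ("p75", q 3),
     ("max", PySem.List.pyGetD lens (-1) 0)]

-- ===== PORT B =====
-- Termination facts for the quickselect recursion (cited by decreasing_by).
theorem pvPivot_mem (a : Int) (as : List Int) :
    PySem.List.pyGetD (a :: as) (PySem.Int.floordiv ((a :: as).length : Int) 2) 0 ∈ a :: as := by
  rw [PySem.Int.floordiv_eq_ediv_of_pos (by norm_num)]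
  rw [show (((a :: as).length : Int)) / 2 = (((a :: as).length / 2 : Nat) : Int) by omega]
  rw [PySem.List.pyGetD_natCast]
  have h : (a :: as).length / 2 < (a :: as).length := Nat.div_lt_self (by simp) (by norm_num)
  rw [List.getD_eq_getElem _ _ h]
  exact List.getElem_mem h

-- B: the five statistics are the order statistics of the lengths at positions
-- 0, (n-1)//4, (n-1)//2, 3*(n-1)//4, n-1; each is computed by an iterative quickselect
-- with the middle element as pivot (the Python while-loop is ported as the obvious recursion).
def pvSel (xs : List Int) (k : Int) : Int :=
  match xs with
  | [] => 0  -- unreachable guard: the Python loop only ever runs on nonempty xs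
  | a :: as =>
    let p := PySem.List.pyGetD (a :: as) (PySem.Int.floordiv ((a :: as).length : Int) 2) 0
    let lt := (a :: as).filter (fun x => x < p)
    if k < (lt.length : Int) then pvSel lt k
    else
      let gt := (a :: as).filter (fun x => p < x)
      let neq := ((a :: as).length : Int) - (gt.length : Int)
      if k < neq then p
      else pvSel gt (k - neq)
termination_by xs.length
decreasing_by
  · exact List.length_filter_lt_length_iff_exists.mpr ⟨_, pvPivot_mem a as, by simp⟩
  · exact List.length_filter_lt_length_iff_exists.mpr ⟨_, pvPivot_mem a as, by simp⟩

def safe_length_stats_alt (texts : List String) : List (String × Int) :=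
  let lens : List Int := texts.map (fun t => PySem.Str.len t)
  if lens.isEmpty then [("min", 0), ("p25", 0), ("median", 0), ("p75", 0), ("max", 0)]
  else
    let m : Int := (lens.length : Int) - 1
    [("min", pvSel lens 0),
     ("p25", pvSel lens (PySem.Int.floordiv m 4)),
     ("median", pvSel lens (PySem.Int.floordiv m 2)),
     ("p75", pvSel lens (PySem.Int.floordiv (3 * m) 4)),
     ("max", pvSel lens m)]

-- ===== PRECONDITION & SPEC =====
def Spec_safe_length_stats (texts : List String) (out : List (String × Int)) : Prop := out = safe_length_stats_alt texts
instance (texts : List String) (out : List (String × Int)) : Decidable (Spec_safe_length_stats texts out) := by unfold Spec_safe_length_stats; infer_instance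

-- ===== CLAIM (what is proved, stated in full; the proofs are below) =====
def Claim_equal_safe_length_stats : Prop := ∀ (texts : List String), Dom_safe_length_stats texts → Spec_safe_length_stats texts (safe_length_stats texts)

-- ===== LEMMAS AND PROOFS =====

theorem pvSorted_partition (xs : List Int) (p : Int) :
    PySem.List.sorted xs (fun x => x) =
      PySem.List.sorted (xs.filter (fun x => x < p)) (fun x => x)
      ++ xs.filter (fun x => x == p)
      ++ PySem.List.sorted (xs.filter (fun x => p < x)) (fun x => x) := by
  apply PySem.List.sorted_id_eq_of_perm_of_pairwise
  · -- Perm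
    rw [List.append_assoc]
    refine List.Perm.trans (List.Perm.append (PySem.List.sorted_perm _ _ _)
      (List.Perm.append_left _ (PySem.List.sorted_perm _ _ _))) ?_
    refine List.Perm.trans (List.Perm.append_left _ ?_) (List.filter_append_perm (fun x => decide (x < p)) xs)
    have h1 : xs.filter (fun x => x == p) = List.filter (fun x => x == p) (List.filter (fun x => !decide (x < p)) xs) := by
      rw [List.filter_filter]
      apply List.filter_congr
      intro x _
      by_cases h : x = p <;> by_cases h2 : x < p <;> simp [h, h2]
    have h2 : xs.filter (fun x => p < x) = List.filter (fun x => !(x == p)) (List.filter (fun x => !decide (x < p)) xs) := by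
      rw [List.filter_filter]
      apply List.filter_congr
      intro x _
      by_cases h : x = p <;> by_cases h2 : x < p <;> by_cases h3 : p < x <;> simp [h, h2, h3] <;> omega
    rw [h1, h2]
    exact List.filter_append_perm _ _
  · -- Pairwise
    rw [List.append_assoc, List.pairwise_append]
    refine ⟨PySem.List.sorted_pairwise _ _, ?_, ?_⟩
    · rw [List.pairwise_append]
      refine ⟨List.pairwise_of_forall_mem_list ?_, PySem.List.sorted_pairwise _ _, ?_⟩
      · intro a ha b hb
        simp at ha hb; omega
      · intro a ha b hb
        simp at ha
        rw [PySem.List.mem_sorted] at hb; simp at hb; omega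
    · intro a ha b hb
      rw [PySem.List.mem_sorted] at ha; simp at ha
      simp [PySem.List.mem_sorted] at hb
      rcases hb with hb | hb <;> omega

theorem pvSel_eq_sorted (n : Nat) : ∀ (xs : List Int) (k : Int), xs.length = n → 0 ≤ k →
    k < (xs.length : Int) →
    pvSel xs k = (PySem.List.sorted xs (fun x => x)).getD k.toNat 0 := by
  induction n using Nat.strong_induction_on with
  | _ n IH =>
    intro xs k hn h0 hk
    match xs with
    | [] => exfalso; simp at hk; omega
    | a :: as =>
      rw [pvSel]
      set p := PySem.List.pyGetD (a :: as) (PySem.Int.floordiv ((a :: as).length : Int) 2) 0 with hp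
      have hpm : p ∈ a :: as := pvPivot_mem a as
      set LT := (a :: as).filter (fun x => x < p) with hLT
      set E := (a :: as).filter (fun x => x == p) with hE
      set GT := (a :: as).filter (fun x => p < x) with hGT
      have hpart : (PySem.List.sorted (a :: as) (fun x => x)) =
          (PySem.List.sorted LT (fun x => x)) ++ E ++ (PySem.List.sorted GT (fun x => x)) := by
        rw [hLT, hE, hGT]; exact pvSorted_partition _ p
      have hlensum : LT.length + E.length + GT.length = (a :: as).length := by
        have hl := congrArg List.length hpart
        simp only [List.length_append, PySem.List.length_sorted] at hl
        omega
      have hlencons : (a :: as).length = as.length + 1 := rfl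
      have hEpos : 0 < E.length :=
        List.length_pos_of_mem (by rw [hE, List.mem_filter]; exact ⟨hpm, by simp⟩)
      rw [hpart]
      split_ifs with h1
      · -- k < LT.length : recurse left
        have hlt : LT.length < n := by
          rw [← hn, hLT]; exact List.length_filter_lt_length_iff_exists.mpr ⟨_, hpm, by simp⟩
        rw [IH LT.length hlt LT k rfl h0 h1]
        rw [List.getD_append _ _ _ _ (by rw [List.length_append, PySem.List.length_sorted]; omega),
            List.getD_append _ _ _ _ (by rw [PySem.List.length_sorted]; omega)]
      · simp only []
        split_ifs with h2
        · -- pivot case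
          rw [List.getD_append _ _ _ _ (by rw [List.length_append, PySem.List.length_sorted]; omega),
              List.getD_append_right _ _ _ _ (by rw [PySem.List.length_sorted]; omega)]
          have hidx : k.toNat - (PySem.List.sorted LT (fun x => x)).length < E.length := by
            rw [PySem.List.length_sorted]; omega
          have h3 : ∀ x ∈ E, x = p := by
            intro x hx; rw [hE, List.mem_filter] at hx; simpa using hx.2
          rw [List.getD_eq_getElem _ _ hidx]
          exact (h3 _ (List.getElem_mem _)).symm
        · -- recurse right
          have hgt : GT.length < n := by
            rw [← hn, hGT]; exact List.length_filter_lt_length_iff_exists.mpr ⟨_, hpm, by simp⟩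
          have h0' : 0 ≤ k - (((a :: as).length : Int) - (GT.length : Int)) := by omega
          have hk' : k - (((a :: as).length : Int) - (GT.length : Int)) < (GT.length : Int) := by
            omega
          rw [IH GT.length hgt GT _ rfl h0' hk']
          rw [List.getD_append_right _ _ _ _ (by
            rw [List.length_append, PySem.List.length_sorted]; omega)]
          congr 1
          rw [List.length_append, PySem.List.length_sorted]
          omega

-- B's entry at position k equals A's lens[idx] read from the sorted list.
theorem pvSel_eq_pyGetD (lens0 : List Int) (k : Int) (h0 : 0 ≤ k)
    (hk : k < (lens0.length : Int)) :
    pvSel lens0 k = PySem.List.pyGetD (PySem.List.sorted lens0 (fun x => x)) k 0 := by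
  rw [pvSel_eq_sorted lens0.length lens0 k rfl h0 hk,
      PySem.List.pyGetD_of_nonneg _ _ h0]

theorem pvGetD_neg_one (xs : List Int) (h : 0 < xs.length) :
    PySem.List.pyGetD xs (-1) 0 = PySem.List.pyGetD xs ((xs.length : Int) - 1) 0 := by
  simp only [PySem.List.pyGetD, PySem.List.pyGet?, PySem.List.pyIdx?]
  rw [if_neg (by omega), if_pos (by omega), if_pos (by omega), if_pos (by omega)]
  simp only [Option.bind_some]
  congr 1
  simp

-- ===== VERDICT (by name: the statement is the Claim_ definition above) =====
theorem safe_length_stats_spec : Claim_equal_safe_length_stats := by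
  unfold Claim_equal_safe_length_stats Spec_safe_length_stats
  intro texts _
  cases texts with
  | nil => rfl
  | cons t ts =>
    simp only [safe_length_stats, safe_length_stats_alt]
    set lens0 : List Int := (t :: ts).map (fun t => PySem.Str.len t) with hl0
    have hlen0 : lens0.length = ts.length + 1 := by rw [hl0]; simp
    have hS_ne : (PySem.List.sorted lens0 (fun x => x) false).isEmpty = false := by
      rw [List.isEmpty_eq_false_iff, ne_eq, PySem.List.sorted_eq_nil_iff]
      intro h; rw [h] at hlen0; simp at hlen0
    have h0_ne : lens0.isEmpty = false := by
      rw [List.isEmpty_eq_false_iff]; intro h; rw [h] at hlen0; simp at hlen0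
    rw [hS_ne, h0_ne]
    simp only [Bool.false_eq_true, if_false]
    simp only [PySem.List.length_sorted]
    have hf4 : ∀ a : Int, PySem.Int.floordiv a 4 = a / 4 :=
      fun a => PySem.Int.floordiv_eq_ediv_of_pos (by norm_num)
    have hf2 : ∀ a : Int, PySem.Int.floordiv a 2 = a / 2 :=
      fun a => PySem.Int.floordiv_eq_ediv_of_pos (by norm_num)
    simp only [hf4, hf2, one_mul]
    rw [pvGetD_neg_one _ (by rw [PySem.List.length_sorted]; omega), PySem.List.length_sorted]
    by_cases hn1 : lens0.length = 1
    · simp only [hn1, if_pos]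
      norm_num
      rw [pvSel_eq_pyGetD lens0 0 (by norm_num) (by omega)]
    · rw [if_neg hn1, if_neg hn1, if_neg hn1]
      rw [show ((lens0.length : Int) - 1) / 2 = 2 * ((lens0.length : Int) - 1) / 4 by omega]
      rw [pvSel_eq_pyGetD lens0 0 (by norm_num) (by omega),
          pvSel_eq_pyGetD lens0 (((lens0.length : Int) - 1) / 4) (by omega) (by omega),
          pvSel_eq_pyGetD lens0 (2 * ((lens0.length : Int) - 1) / 4) (by omega) (by omega),
          pvSel_eq_pyGetD lens0 (3 * ((lens0.length : Int) - 1) / 4) (by omega) (by omega),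
          pvSel_eq_pyGetD lens0 ((lens0.length : Int) - 1) (by omega) (by omega)]
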